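-- pv_equiv track=rewrite | github.com/cirosantilli/project-euler-solvers | solvers/399.py | rank_of_apparition_prime
-- ===== SOURCE A (Python) =====
-- def fib_mod(n: int, mod: int) -> int:
--     """Return F_n mod mod, with F_0 = 0, F_1 = 1."""
--     a, b = 0, 1
--     # Process bits from MSB to LSB.
--     for bit in range(n.bit_length() - 1, -1, -1):
--         # (a, b) = (F_k, F_{k+1})
--         two_b_minus_a = (2 * b - a) % mod
--         c = (a * two_b_minus_a) % mod  # F_{2k}
--         d = (a * a + b * b) % mod  # F_{2k+1}
--         if (n >> bit) & 1:
--             a, b = d, (c + d) % mod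
--         else:
--             a, b = c, d
--     return a
--
-- def unique_prime_factors_small(n: int, small_primes: list[int]) -> list[int]:
--     """Return the unique prime factors of n (n is expected to be <= a few million)."""
--     factors: list[int] = []
--     x = n
--     for p in small_primes:
--         if p * p > x:
--             break
--         if x % p == 0:
--             factors.append(p)
--             while x % p == 0:
--                 x //= p
--     if x > 1:
--         factors.append(x)
--     return factors
--
-- def legendre_symbol_5(p: int) -> int:
--     """Legendre symbol (5/p) for odd prime p != 5; returns +1 or -1."""
--     r = pow(5, (p - 1) // 2, p)
--     return 1 if r == 1 else -1
--
-- def rank_of_apparition_prime(p: int, small_primes: list[int]) -> int: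
--     """Compute z(p): smallest n >= 1 such that p | F_n.
--
--     Uses the well-known fact that for prime p != 5:
--       z(p) divides p - (5/p), where (5/p) is the Legendre symbol.
--
--     Then reduces that candidate by testing divisors using Fibonacci mod p.
--     """
--     if p == 2:
--         return 3
--     if p == 5:
--         return 5
--
--     s = legendre_symbol_5(p)
--     cand = p - 1 if s == 1 else p + 1
--     d = cand
--
--     for q in unique_prime_factors_small(cand, small_primes):
--         while d % q == 0 and fib_mod(d // q, p) == 0:
--             d //= q
--
--     return d
-- ===== SOURCE B (Python) =====
-- def fib_mod(n: int, mod: int) -> int: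
--     """Return F_n mod mod, with F_0 = 0, F_1 = 1."""
--     a, b = 0, 1
--     for bit in range(n.bit_length() - 1, -1, -1):
--         two_b_minus_a = (2 * b - a) % mod
--         c = (a * two_b_minus_a) % mod
--         d = (a * a + b * b) % mod
--         if (n >> bit) & 1:
--             a, b = d, (c + d) % mod
--         else:
--             a, b = c, d
--     return a
--
-- def rank_of_apparition_prime(p: int, small_primes: list[int]) -> int:
--     if p == 2:
--         return 3
--     if p == 5:
--         return 5
--     cand = p - 1 if pow(5, (p - 1) // 2, p) == 1 else p + 1
--     # fully factor cand (with multiplicities) by trial division over small_primes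
--     fac = []
--     x = cand
--     for q in small_primes:
--         if q * q > x:
--             break
--         e = 0
--         while x % q == 0:
--             x //= q
--             e += 1
--         if e:
--             fac.append((q, e))
--     if x > 1:
--         fac.append((x, 1))
--     # enumerate every divisor of cand, ascending, and return the first whose
--     # Fibonacci index is 0 mod p
--     divs = [1]
--     for q, e in fac:
--         divs = [d * q ** i for d in divs for i in range(e + 1)]
--     divs.sort()
--     for d in divs:
--         if fib_mod(d, p) == 0:
--             return d
--     return cand
-- ===== Notes on version B (the rewrite author's own statement) =====
-- stated objective: alternative
-- what changed: Instead of iteratively stripping prime factors from the candidate while the Fibonacci test stays zero, B fully factors the candidate with multiplicities, enumerates ALL of its divisors, sorts them ascending, and returns the first divisor whose Fibonacci index is 0 mod p (an enumerate-and-test-minimal strategy instead of order reduction).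
-- outside the precondition, e.g. on rank_of_apparition_prime(323, [6]): A returns 54, B returns 36; on rank_of_apparition_prime(7, [-2]): A returns 8, B returns -8; on rank_of_apparition_prime(17, [4]): A returns 18, B returns 18
import Mathlib
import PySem

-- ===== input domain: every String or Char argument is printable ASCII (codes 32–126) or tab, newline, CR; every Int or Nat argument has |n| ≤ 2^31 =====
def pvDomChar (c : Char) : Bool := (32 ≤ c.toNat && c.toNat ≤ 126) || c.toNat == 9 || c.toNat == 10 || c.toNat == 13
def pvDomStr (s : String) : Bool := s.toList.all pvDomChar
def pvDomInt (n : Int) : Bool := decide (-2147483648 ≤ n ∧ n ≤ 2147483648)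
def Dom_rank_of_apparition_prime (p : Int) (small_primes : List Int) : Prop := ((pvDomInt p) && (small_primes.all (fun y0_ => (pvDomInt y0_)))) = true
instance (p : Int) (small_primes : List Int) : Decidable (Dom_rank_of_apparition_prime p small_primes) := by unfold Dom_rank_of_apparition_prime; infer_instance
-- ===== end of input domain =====

-- B replaces A's iterative order reduction (strip prime factors while the Fibonacci test stays
-- zero) by an enumerate-and-test-minimal strategy: factor the candidate with multiplicities,
-- generate ALL its divisors sorted ascending, return the first whose Fibonacci index is 0 mod p.
-- Both ports share the module helper fib_mod (identical in Source A and Source B), ported once below.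

-- termination helper cited by the ports' while-loops
theorem pvFloordivLt (q x : Int) (hq : 2 ≤ q) (hx : 1 ≤ x) :
    (PySem.Int.floordiv x q).toNat < x.toNat ∧ 0 ≤ PySem.Int.floordiv x q := by
  rw [PySem.Int.floordiv_eq_ediv_of_pos (by omega)]
  have h0 : 0 ≤ x / q := Int.ediv_nonneg (by omega) (by omega)
  have h1 : x / q * q ≤ x := Int.ediv_mul_le x (by omega)
  have h2 : x / q * 2 ≤ x / q * q := mul_le_mul_of_nonneg_left (by omega) h0
  omega

-- ===== SHARED HELPER (identical fib_mod in Source A and Source B) =====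
-- fib_mod: MSB-to-LSB fast doubling; one step at bit index `bit`
def pvFibStep (n p : Int) (bit : Nat) (ab : Int × Int) : Int × Int :=
  let a := ab.1
  let b := ab.2
  let two_b_minus_a := PySem.Int.mod (2 * b - a) p
  let c := PySem.Int.mod (a * two_b_minus_a) p
  let d := PySem.Int.mod (a * a + b * b) p
  if PySem.Int.band (PySem.Int.floordiv n (2 ^ bit)) 1 = 1 then (d, PySem.Int.mod (c + d) p)
  else (c, d)

-- for bit in range(n.bit_length()-1, -1, -1): processes bit k, then k-1, …, 0
def pvFibLoop (n p : Int) : Nat → Int × Int → Int × Int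
  | 0, ab => ab
  | k + 1, ab => pvFibLoop n p k (pvFibStep n p k ab)

def fib_mod_py (n p : Int) : Int := (pvFibLoop n p (PySem.Int.bitLength n) (0, 1)).1

-- ===== PORT A =====
-- while x % q == 0: x //= q   (guard 2 ≤ q ∧ 1 ≤ x only makes the recursion total; it holds
-- on every call reached from an input satisfying Pre_)
def pvStripA (q x : Int) : Int :=
  if _h : 2 ≤ q ∧ 1 ≤ x ∧ PySem.Int.mod x q = 0 then pvStripA q (PySem.Int.floordiv x q) else x
termination_by x.toNat
decreasing_by
  exact (pvFloordivLt q x (by omega) (by omega)).1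

-- the `for p in small_primes` loop of unique_prime_factors_small, with the growing
-- `factors` list as accumulator; returns (factors, final x)
def pvFacLoopA : List Int → Int → List Int → List Int × Int
  | [], x, acc => (acc, x)
  | q :: rest, x, acc =>
    if q * q > x then (acc, x)
    else if PySem.Int.mod x q = 0 then pvFacLoopA rest (pvStripA q x) (acc ++ [q])
    else pvFacLoopA rest x acc

def pvUniquePrimeFactorsSmall (n : Int) (small_primes : List Int) : List Int :=
  let r := pvFacLoopA small_primes n []
  if r.2 > 1 then r.1 ++ [r.2] else r.1

-- legendre_symbol_5 (exponent (p-1)//2 ≥ 0 whenever p ≥ 1, i.e. on Pre_)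
def pvLegendreA (p : Int) : Int :=
  let r := PySem.Int.powMod 5 (PySem.Int.floordiv (p - 1) 2).toNat p
  if r = 1 then 1 else -1

-- while d % q == 0 and fib_mod(d // q, p) == 0: d //= q   (totality guard as in pvStripA)
def pvStripDA (p q d : Int) : Int :=
  if _h : 2 ≤ q ∧ 1 ≤ d ∧ PySem.Int.mod d q = 0 ∧ fib_mod_py (PySem.Int.floordiv d q) p = 0 then
    pvStripDA p q (PySem.Int.floordiv d q)
  else d
termination_by d.toNat
decreasing_by
  exact (pvFloordivLt q d (by omega) (by omega)).1

def pvReduceA (p : Int) : List Int → Int → Int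
  | [], d => d
  | q :: rest, d => pvReduceA p rest (pvStripDA p q d)

def rank_of_apparition_prime (p : Int) (small_primes : List Int) : Int :=
  if p = 2 then 3
  else if p = 5 then 5
  else
    let s := pvLegendreA p
    let cand := if s = 1 then p - 1 else p + 1
    pvReduceA p (pvUniquePrimeFactorsSmall cand small_primes) cand

-- ===== PORT B =====
-- while x % q == 0: x //= q; e += 1   (same totality guard as pvStripA)
def pvStripCountB (q x : Int) (e : Nat) : Int × Nat :=
  if _h : 2 ≤ q ∧ 1 ≤ x ∧ PySem.Int.mod x q = 0 then
    pvStripCountB q (PySem.Int.floordiv x q) (e + 1)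
  else (x, e)
termination_by x.toNat
decreasing_by
  exact (pvFloordivLt q x (by omega) (by omega)).1

-- the `for q in small_primes` factorisation loop, accumulating (q, e) pairs
def pvFacLoopB : List Int → Int → List (Int × Nat) → List (Int × Nat) × Int
  | [], x, acc => (acc, x)
  | q :: rest, x, acc =>
    if q * q > x then (acc, x)
    else
      let r := pvStripCountB q x 0
      if r.2 ≠ 0 then pvFacLoopB rest r.1 (acc ++ [(q, r.2)]) else pvFacLoopB rest r.1 acc

-- divs = [d * q**i for d in divs for i in range(e + 1)]
def pvDivStepB (divs : List Int) (qe : Int × Nat) : List Int :=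
  divs.flatMap (fun d => (List.range (qe.2 + 1)).map (fun i => d * qe.1 ^ i))

-- for d in divs: if fib_mod(d, p) == 0: return d
def pvFindB (p : Int) : List Int → Option Int
  | [] => none
  | d :: rest => if fib_mod_py d p = 0 then some d else pvFindB p rest

def rank_of_apparition_prime_alt (p : Int) (small_primes : List Int) : Int :=
  if p = 2 then 3
  else if p = 5 then 5
  else
    let cand :=
      if PySem.Int.powMod 5 (PySem.Int.floordiv (p - 1) 2).toNat p = 1 then p - 1 else p + 1
    let fx := pvFacLoopB small_primes cand []
    let fac := if fx.2 > 1 then fx.1 ++ [(fx.2, 1)] else fx.1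
    let divs := PySem.List.sorted (fac.foldl pvDivStepB [1]) id false
    match pvFindB p divs with
    | some d => d
    | none => cand

-- ===== PRECONDITION & SPEC =====
-- entries of small_primes up to (and including) the first certainly-breaking one
-- (q*q > p+1 ≥ cand ≥ x, so the trial-division loop stops there) must be genuine primes;
-- everything after that break is never reached
def pvEntriesOk (p : Int) : List Int → Bool
  | [] => true
  | q :: rest =>
    decide (p + 1 < q * q) || (decide (2 ≤ q) && decide (Nat.Prime q.toNat) && pvEntriesOk p rest)

-- Pre_ keeps p ≥ 1 and (unless p is 2 or 5, which return before the list is read) lists whose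
-- scanned prefix contains only genuine primes — the documented contract of the small_primes
-- parameter.  Outside it A raises (p = 0: pow() ValueError; a reachable 0 entry:
-- ZeroDivisionError), diverges (a reachable ±1 entry), or — for negative p, a reachable small
-- negative entry, or a reachable composite entry — returns a value that is an artefact of its
-- pseudo-factorisation / Python's sign conventions, where A's and B's values are both defensible.
def Pre_rank_of_apparition_prime (p : Int) (small_primes : List Int) : Prop :=
  1 ≤ p ∧ (p = 2 ∨ p = 5 ∨ pvEntriesOk p small_primes = true)
instance (p : Int) (small_primes : List Int) : Decidable (Pre_rank_of_apparition_prime p small_primes) := by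
  unfold Pre_rank_of_apparition_prime; infer_instance

def pvWitness_rank_of_apparition_prime : Int × List Int := (7, [2, 3])

def Spec_rank_of_apparition_prime (p : Int) (small_primes : List Int) (out : Int) : Prop := out = rank_of_apparition_prime_alt p small_primes
instance (p : Int) (small_primes : List Int) (out : Int) : Decidable (Spec_rank_of_apparition_prime p small_primes out) := by unfold Spec_rank_of_apparition_prime; infer_instance

-- ===== CLAIM (what is proved, stated in full; the proofs are below) =====
def Claim_equal_rank_of_apparition_prime : Prop := ∀ (p : Int) (small_primes : List Int), Dom_rank_of_apparition_prime p small_primes → Pre_rank_of_apparition_prime p small_primes → Spec_rank_of_apparition_prime p small_primes (rank_of_apparition_prime p small_primes)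

-- ===== LEMMAS AND PROOFS =====

-- ---------- fib_mod_py computes F_n mod p ----------
theorem pvModReduce (p a : Int) : Int.ModEq p (a % p) a := Int.emod_emod_of_dvd a dvd_rfl

theorem pvFibTwoMulInt (m : Nat) :
    (Nat.fib (2 * m) : Int) = (Nat.fib m : Int) * (2 * (Nat.fib (m + 1) : Int) - Nat.fib m) := by
  have h2 : Nat.fib m ≤ 2 * Nat.fib (m + 1) := le_trans (Nat.fib_le_fib_succ) (by omega)
  rw [Nat.fib_two_mul, Nat.cast_mul, Nat.cast_sub h2]; push_cast; ring

theorem pvFibTwoMulAddOneInt (m : Nat) :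
    (Nat.fib (2 * m + 1) : Int) =
      (Nat.fib m : Int) * Nat.fib m + (Nat.fib (m + 1) : Int) * Nat.fib (m + 1) := by
  rw [Nat.fib_two_mul_add_one]; push_cast; ring

theorem pvStep_inv (p : Int) (hp : 0 < p) (N k : Nat) (a b : Int)
    (ha : a % p = (Nat.fib (N / 2 ^ (k + 1)) : Int) % p)
    (hb : b % p = (Nat.fib (N / 2 ^ (k + 1) + 1) : Int) % p) :
    (pvFibStep (N : Int) p k (a, b)).1 % p = (Nat.fib (N / 2 ^ k) : Int) % p ∧
    (pvFibStep (N : Int) p k (a, b)).2 % p = (Nat.fib (N / 2 ^ k + 1) : Int) % p ∧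
    (pvFibStep (N : Int) p k (a, b)).1 % p = (pvFibStep (N : Int) p k (a, b)).1 ∧
    (pvFibStep (N : Int) p k (a, b)).2 % p = (pvFibStep (N : Int) p k (a, b)).2 := by
  have ha' : Int.ModEq p a (Nat.fib (N / 2 ^ (k + 1)) : Int) := ha
  have hb' : Int.ModEq p b (Nat.fib (N / 2 ^ (k + 1) + 1) : Int) := hb
  set m := N / 2 ^ (k + 1) with hm
  have hdiv : N / 2 ^ k / 2 = m := by rw [hm, pow_succ, Nat.div_div_eq_div_mul]
  have hdm := Nat.div_add_mod (N / 2 ^ k) 2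
  have hfd : PySem.Int.floordiv ((N : Nat) : Int) (2 ^ k) = ((N / 2 ^ k : Nat) : Int) := by
    rw [show ((2 : Int) ^ k) = ((2 ^ k : Nat) : Int) by push_cast; ring]
    exact PySem.Int.floordiv_natCast N (2 ^ k)
  have hband : PySem.Int.band ((N / 2 ^ k : Nat) : Int) 1 = ((N / 2 ^ k % 2 : Nat) : Int) := by
    rw [show (1 : Int) = ((1 : Nat) : Int) from rfl, PySem.Int.band_natCast, Nat.and_one_is_mod]
  have hmod : ∀ z : Int, PySem.Int.mod z p = z % p := fun z => PySem.Int.mod_eq_emod_of_pos hp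
  have htb : Int.ModEq p ((2 * b - a) % p)
      (2 * (Nat.fib (m + 1) : Int) - (Nat.fib m : Int)) :=
    (pvModReduce p _).trans ((hb'.mul_left 2).sub ha')
  have hc : Int.ModEq p (a * ((2 * b - a) % p)) ((Nat.fib (2 * m) : Int)) := by
    rw [pvFibTwoMulInt]; exact ha'.mul htb
  have hd : Int.ModEq p (a * a + b * b) ((Nat.fib (2 * m + 1) : Int)) := by
    rw [pvFibTwoMulAddOneInt]; exact (ha'.mul ha').add (hb'.mul hb')
  have hsum : Int.ModEq p ((a * ((2 * b - a) % p)) % p + (a * a + b * b) % p)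
      ((Nat.fib (2 * m + 2) : Int)) := by
    have he : (Nat.fib (2 * m + 2) : Int) = (Nat.fib (2 * m) : Int) + (Nat.fib (2 * m + 1) : Int) := by
      rw [Nat.fib_add_two]; push_cast; ring
    rw [he]; exact ((pvModReduce p _).trans hc).add ((pvModReduce p _).trans hd)
  simp only [pvFibStep, hmod, hfd, hband]
  by_cases hbit : N / 2 ^ k % 2 = 1
  · have hcond : ((N / 2 ^ k % 2 : Nat) : Int) = 1 := by rw [hbit]; rfl
    rw [if_pos hcond]
    have hNk : N / 2 ^ k = 2 * m + 1 := by omega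
    refine ⟨?_, ?_, ?_, ?_⟩
    · rw [hNk]; exact (pvModReduce p _).trans hd
    · rw [hNk]; exact (pvModReduce p _).trans hsum
    · exact Int.emod_emod_of_dvd _ dvd_rfl
    · exact Int.emod_emod_of_dvd _ dvd_rfl
  · have hcond : ¬ ((N / 2 ^ k % 2 : Nat) : Int) = 1 := by
      intro hcc; exact hbit (by exact_mod_cast hcc)
    rw [if_neg hcond]
    have hNk : N / 2 ^ k = 2 * m := by omega
    refine ⟨?_, ?_, ?_, ?_⟩
    · rw [hNk]; exact (pvModReduce p _).trans hc
    · rw [hNk]; exact (pvModReduce p _).trans hd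
    · exact Int.emod_emod_of_dvd _ dvd_rfl
    · exact Int.emod_emod_of_dvd _ dvd_rfl

theorem pvLoop_inv (p : Int) (hp : 0 < p) (N : Nat) :
    ∀ (k : Nat) (a b : Int),
      a % p = (Nat.fib (N / 2 ^ k) : Int) % p →
      b % p = (Nat.fib (N / 2 ^ k + 1) : Int) % p →
      (pvFibLoop (N : Int) p k (a, b)).1 % p = (Nat.fib N : Int) % p ∧
      ((pvFibLoop (N : Int) p k (a, b)).1 % p = (pvFibLoop (N : Int) p k (a, b)).1 ∨
        (pvFibLoop (N : Int) p k (a, b)).1 = a) := by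
  intro k
  induction k with
  | zero =>
    intro a b ha hb
    refine ⟨?_, Or.inr rfl⟩
    simpa using ha
  | succ k ih =>
    intro a b ha hb
    obtain ⟨h1, h2, h3, h4⟩ := pvStep_inv p hp N k a b ha hb
    have hrec := ih (pvFibStep (N : Int) p k (a, b)).1 (pvFibStep (N : Int) p k (a, b)).2 h1 h2
    rw [Prod.mk.eta] at hrec
    have hdef : pvFibLoop (N : Int) p (k + 1) (a, b) =
        pvFibLoop (N : Int) p k (pvFibStep (N : Int) p k (a, b)) := rfl
    rw [hdef]
    obtain ⟨hA, hB⟩ := hrec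
    refine ⟨hA, ?_⟩
    rcases hB with hB | hB
    · exact Or.inl hB
    · exact Or.inl (by rw [hB]; exact h3)

theorem pvFib_eq (n p : Int) (hn : 0 ≤ n) (hp : 0 < p) :
    fib_mod_py n p = (Nat.fib n.toNat : Int) % p := by
  have hN : ((n.toNat : Nat) : Int) = n := Int.toNat_of_nonneg hn
  unfold fib_mod_py
  rw [← hN]
  simp only [Int.toNat_natCast]
  set N := n.toNat with hNdef
  have hlt : N < 2 ^ PySem.Int.bitLength ((N : Nat) : Int) := by
    have h := PySem.Int.lt_two_pow_bitLength ((N : Nat) : Int)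
    simpa using h
  have hbl : N / 2 ^ PySem.Int.bitLength ((N : Nat) : Int) = 0 := Nat.div_eq_of_lt hlt
  have h := pvLoop_inv p hp N (PySem.Int.bitLength ((N : Nat) : Int)) 0 1
    (by rw [hbl]; simp) (by rw [hbl]; simp)
  obtain ⟨h1, h2⟩ := h
  rcases h2 with h2 | h2
  · rw [← h2, h1]
  · rw [h2] at h1 ⊢
    rw [Int.zero_emod] at h1
    exact h1

-- ---------- the Fibonacci zero predicate Zb and its two closure properties ----------
def Zb (p : Int) (n : Nat) : Prop := fib_mod_py (n : Int) p = 0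

theorem pvZb_iff (p : Int) (hp : 0 < p) (n : Nat) : Zb p n ↔ p.toNat ∣ Nat.fib n := by
  unfold Zb
  rw [pvFib_eq _ _ (Int.natCast_nonneg n) hp]
  simp only [Int.toNat_natCast]
  constructor
  · intro h
    have hd : p ∣ (Nat.fib n : Int) := Int.dvd_of_emod_eq_zero h
    have hp' : p = ((p.toNat : Nat) : Int) := (Int.toNat_of_nonneg (by omega)).symm
    rw [hp'] at hd
    exact_mod_cast hd
  · intro h
    apply Int.emod_eq_zero_of_dvd
    have hp' : p = ((p.toNat : Nat) : Int) := (Int.toNat_of_nonneg (by omega)).symm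
    rw [hp']
    exact_mod_cast h

theorem pvZup (p : Int) (hp : 0 < p) {a b : Nat} (h : a ∣ b) (ha : Zb p a) : Zb p b := by
  rw [pvZb_iff p hp] at ha ⊢
  exact ha.trans (Nat.fib_dvd a b h)

theorem pvZgcd (p : Int) (hp : 0 < p) {a b : Nat} (ha : Zb p a) (hb : Zb p b) :
    Zb p (Nat.gcd a b) := by
  rw [pvZb_iff p hp] at ha hb ⊢
  rw [Nat.fib_gcd]
  exact Nat.dvd_gcd ha hb

-- ---------- Nat models of the loops ----------
def pvStripCN (q x : Nat) (e : Nat) : Nat × Nat :=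
  if _h : 2 ≤ q ∧ 1 ≤ x ∧ x % q = 0 then pvStripCN q (x / q) (e + 1) else (x, e)
termination_by x
decreasing_by exact Nat.div_lt_self (by omega) (by omega)

-- Nat model of the trial-division loop (break condition kept on the original Int entry)
def pvFacN : List Int → Nat → List (Nat × Nat) × Nat
  | [], x => ([], x)
  | q :: rest, x =>
    if q * q > (x : Int) then ([], x)
    else
      let r := pvStripCN q.toNat x 0
      let t := pvFacN rest r.1
      if r.2 ≠ 0 then ((q.toNat, r.2) :: t.1, t.2) else (t.1, t.2)

def pvStripZN (p : Int) (q d : Nat) : Nat :=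
  if _h : 2 ≤ q ∧ 1 ≤ d ∧ d % q = 0 ∧ fib_mod_py (((d / q : Nat) : Int)) p = 0 then
    pvStripZN p q (d / q)
  else d
termination_by d
decreasing_by exact Nat.div_lt_self (by omega) (by omega)

def pvRedN (p : Int) : List Nat → Nat → Nat
  | [], d => d
  | q :: rest, d => pvRedN p rest (pvStripZN p q d)

def pvStepN (divs : List Nat) (qe : Nat × Nat) : List Nat :=
  divs.flatMap (fun d => (List.range (qe.2 + 1)).map (fun i => d * qe.1 ^ i))

def pvDN (L : List (Nat × Nat)) : List Nat := L.foldl pvStepN [1]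

def pvProdN (L : List (Nat × Nat)) : Nat := (L.map (fun qe => qe.1 ^ qe.2)).prod

def pvGoodN (L : List (Nat × Nat)) : Prop :=
  (∀ qe ∈ L, 2 ≤ qe.1 ∧ 1 ≤ qe.2) ∧ L.Pairwise (fun a b => Nat.Coprime a.1 b.1)

-- ---------- lattice lemmas about pvDN ----------
theorem pvMemFoldlStep (L : List (Nat × Nat)) :
    ∀ (divs0 : List Nat) (x : Nat),
      x ∈ List.foldl pvStepN divs0 L ↔ ∃ d ∈ divs0, ∃ m ∈ pvDN L, x = d * m := by
  induction L with
  | nil =>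
    intro divs0 x
    simp [pvDN]
  | cons qe L ih =>
    intro divs0 x
    obtain ⟨q, e⟩ := qe
    have hstep : ∀ (ds : List Nat) (y : Nat),
        y ∈ pvStepN ds (q, e) ↔ ∃ d ∈ ds, ∃ i ≤ e, y = d * q ^ i := by
      intro ds y
      simp only [pvStepN, List.mem_flatMap, List.mem_map, List.mem_range]
      constructor
      · rintro ⟨d, hd, i, hi, rfl⟩
        exact ⟨d, hd, i, by omega, rfl⟩
      · rintro ⟨d, hd, i, hi, rfl⟩
        exact ⟨d, hd, i, by omega, rfl⟩
    have hL : List.foldl pvStepN divs0 ((q, e) :: L) = List.foldl pvStepN (pvStepN divs0 (q, e)) L := rfl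
    have hD : pvDN ((q, e) :: L) = List.foldl pvStepN (pvStepN [1] (q, e)) L := rfl
    rw [hL, ih]
    constructor
    · rintro ⟨d', hd', m, hm, rfl⟩
      rw [hstep] at hd'
      obtain ⟨d, hd, i, hi, rfl⟩ := hd'
      refine ⟨d, hd, q ^ i * m, ?_, by ring⟩
      rw [hD, ih]
      exact ⟨q ^ i, by rw [hstep]; exact ⟨1, by simp, i, hi, by ring⟩, m, hm, rfl⟩
    · rintro ⟨d, hd, m', hm', rfl⟩
      rw [hD, ih] at hm'
      obtain ⟨d'', hd'', m, hm, rfl⟩ := hm'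
      rw [hstep] at hd''
      obtain ⟨o, ho, i, hi, rfl⟩ := hd''
      simp only [List.mem_singleton] at ho
      subst ho
      refine ⟨d * q ^ i, ?_, m, hm, by ring⟩
      rw [hstep]
      exact ⟨d, hd, i, hi, rfl⟩

theorem pvMemDNnil (x : Nat) : x ∈ pvDN [] ↔ x = 1 := by
  simp [pvDN]

theorem pvMemDNcons (q e : Nat) (L : List (Nat × Nat)) (x : Nat) :
    x ∈ pvDN ((q, e) :: L) ↔ ∃ i ≤ e, ∃ m ∈ pvDN L, x = q ^ i * m := by
  have h : pvDN ((q, e) :: L) = List.foldl pvStepN (pvStepN [1] (q, e)) L := rfl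
  rw [h, pvMemFoldlStep]
  constructor
  · rintro ⟨d, hd, m, hm, rfl⟩
    simp only [pvStepN, List.mem_flatMap, List.mem_map, List.mem_range,
      List.mem_singleton] at hd
    obtain ⟨o, ho, i, hi, rfl⟩ := hd
    subst ho
    exact ⟨i, by omega, m, hm, by ring⟩
  · rintro ⟨i, hi, m, hm, rfl⟩
    refine ⟨q ^ i, ?_, m, hm, rfl⟩
    simp only [pvStepN, List.mem_flatMap, List.mem_map, List.mem_range, List.mem_singleton]
    exact ⟨1, rfl, i, by omega, by ring⟩

theorem pvDvdProdN (L : List (Nat × Nat)) (d : Nat) (hd : d ∈ pvDN L) : d ∣ pvProdN L := by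
  induction L generalizing d with
  | nil =>
    rw [pvMemDNnil] at hd
    simp [hd, pvProdN]
  | cons qe L ih =>
    obtain ⟨q, e⟩ := qe
    rw [pvMemDNcons] at hd
    obtain ⟨i, hi, m, hm, rfl⟩ := hd
    have h1 : pvProdN ((q, e) :: L) = q ^ e * pvProdN L := by
      simp [pvProdN]
    rw [h1]
    exact mul_dvd_mul (pow_dvd_pow q hi) (ih m hm)

theorem pvProdMemDN (L : List (Nat × Nat)) : pvProdN L ∈ pvDN L := by
  induction L with
  | nil => simp [pvMemDNnil, pvProdN]
  | cons qe L ih =>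
    obtain ⟨q, e⟩ := qe
    rw [pvMemDNcons]
    exact ⟨e, le_rfl, pvProdN L, ih, by simp [pvProdN]⟩

theorem pvProdNpos (L : List (Nat × Nat)) (h : ∀ qe ∈ L, 2 ≤ qe.1 ∧ 1 ≤ qe.2) :
    0 < pvProdN L := by
  induction L with
  | nil => simp [pvProdN]
  | cons qe L ih =>
    have h1 : pvProdN (qe :: L) = qe.1 ^ qe.2 * pvProdN L := by simp [pvProdN]
    rw [h1]
    have hq := h qe (by simp)
    have := ih (fun x hx => h x (by simp [hx]))
    exact Nat.mul_pos (Nat.pow_pos (by omega)) this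

theorem pvMemDNpos (L : List (Nat × Nat)) (hg : ∀ qe ∈ L, 2 ≤ qe.1 ∧ 1 ≤ qe.2)
    (d : Nat) (hd : d ∈ pvDN L) : 0 < d :=
  Nat.pos_of_dvd_of_pos (pvDvdProdN L d hd) (pvProdNpos L hg)

theorem pvCoprimeProdN (q : Nat) (L : List (Nat × Nat)) (h : ∀ qe ∈ L, Nat.Coprime q qe.1) :
    Nat.Coprime q (pvProdN L) := by
  induction L with
  | nil => simp [pvProdN]
  | cons qe L ih =>
    have h1 : pvProdN (qe :: L) = qe.1 ^ qe.2 * pvProdN L := by simp [pvProdN]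
    rw [h1]
    exact Nat.Coprime.mul_right ((h qe (by simp)).pow_right _)
      (ih (fun x hx => h x (by simp [hx])))

-- q is a key and divides d ∈ pvDN L: the exact quotient stays in the lattice
theorem pvDivMemDN (L : List (Nat × Nat)) (hg : pvGoodN L) (d q : Nat)
    (hd : d ∈ pvDN L) (hq : q ∈ L.map Prod.fst) (hdvd : q ∣ d) : d / q ∈ pvDN L := by
  induction L generalizing d with
  | nil => simp at hq
  | cons qe L ih =>
    obtain ⟨q0, e0⟩ := qe
    obtain ⟨hall, hpw⟩ := hg
    have hpc := List.pairwise_cons.mp hpw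
    have hgtail : pvGoodN L := ⟨fun x hx => hall x (by simp [hx]), hpc.2⟩
    rw [pvMemDNcons] at hd
    obtain ⟨i, hi, m, hm, rfl⟩ := hd
    have hq02 : 2 ≤ q0 := (hall (q0, e0) (by simp)).1
    simp only [List.map_cons, List.mem_cons] at hq
    rcases hq with rfl | hq
    · have hcm : Nat.Coprime q m :=
        Nat.Coprime.coprime_dvd_right (pvDvdProdN L m hm)
          (pvCoprimeProdN q L (fun x hx => hpc.1 x hx))
      have hqi : q ∣ q ^ i := hcm.dvd_of_dvd_mul_right hdvd
      have hipos : 1 ≤ i := by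
        by_contra hc
        have hi0 : i = 0 := by omega
        subst hi0
        simp at hqi
        omega
      have hsplit : q ^ i * m = q * (q ^ (i - 1) * m) := by
        rw [← mul_assoc, ← pow_succ']
        congr 2
        omega
      rw [hsplit, Nat.mul_div_cancel_left _ (by omega)]
      rw [pvMemDNcons]
      exact ⟨i - 1, by omega, m, hm, rfl⟩
    · obtain ⟨b, hb, rfl⟩ := List.mem_map.mp hq
      have hcq0 : Nat.Coprime b.1 q0 := (hpc.1 b hb).symm
      have hqm : b.1 ∣ m := (hcq0.pow_right i).dvd_of_dvd_mul_left hdvd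
      rw [Nat.mul_div_assoc _ hqm, pvMemDNcons]
      exact ⟨i, hi, m / b.1, ih hgtail m hm (List.mem_map.mpr ⟨b, hb, rfl⟩) hqm, rfl⟩

theorem pvGcdPowMul (q i j a b : Nat) (ha : Nat.Coprime q a) (hb : Nat.Coprime q b) :
    Nat.gcd (q ^ i * a) (q ^ j * b) = q ^ (min i j) * Nat.gcd a b := by
  rcases le_total i j with h | h
  · have hsplit : q ^ j = q ^ i * q ^ (j - i) := by
      rw [← pow_add]; congr 1; omega
    rw [hsplit, mul_assoc, Nat.gcd_mul_left,
      Nat.Coprime.gcd_mul_left_cancel_right b (Nat.Coprime.pow_left _ ha),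
      Nat.min_eq_left h]
  · have hsplit : q ^ i = q ^ j * q ^ (i - j) := by
      rw [← pow_add]; congr 1; omega
    rw [hsplit, mul_assoc, Nat.gcd_mul_left,
      Nat.Coprime.gcd_mul_left_cancel a (Nat.Coprime.pow_left _ hb),
      Nat.min_eq_right h]

-- the key lattice lemma: if a does not divide b (both in the lattice), some key q divides a
-- with gcd a b ∣ a / q
theorem pvLatticeStep (L : List (Nat × Nat)) (hg : pvGoodN L) (a b : Nat)
    (ha : a ∈ pvDN L) (hb : b ∈ pvDN L) (hnd : ¬ a ∣ b) :
    ∃ q ∈ L.map Prod.fst, q ∣ a ∧ Nat.gcd a b ∣ a / q := by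
  induction L generalizing a b with
  | nil =>
    rw [pvMemDNnil] at ha hb
    subst ha; subst hb
    simp at hnd
  | cons qe L ih =>
    obtain ⟨q0, e0⟩ := qe
    obtain ⟨hall, hpw⟩ := hg
    have hpc := List.pairwise_cons.mp hpw
    have hgtail : pvGoodN L := ⟨fun x hx => hall x (by simp [hx]), hpc.2⟩
    have hq02 : 2 ≤ q0 := (hall (q0, e0) (by simp)).1
    rw [pvMemDNcons] at ha hb
    obtain ⟨i, hi, A, hA, rfl⟩ := ha
    obtain ⟨j, hj, B, hB, rfl⟩ := hb
    have hcprod : Nat.Coprime q0 (pvProdN L) := pvCoprimeProdN q0 L (fun x hx => hpc.1 x hx)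
    have hca : Nat.Coprime q0 A := Nat.Coprime.coprime_dvd_right (pvDvdProdN L A hA) hcprod
    have hcb : Nat.Coprime q0 B := Nat.Coprime.coprime_dvd_right (pvDvdProdN L B hB) hcprod
    have hgcd := pvGcdPowMul q0 i j A B hca hcb
    by_cases hab : A ∣ B
    · have hij : j < i := by
        by_contra hc
        exact hnd (mul_dvd_mul (pow_dvd_pow q0 (by omega)) hab)
      refine ⟨q0, by simp, dvd_mul_of_dvd_left (dvd_pow_self q0 (by omega)) A, ?_⟩
      have hdivq : q0 ^ i * A / q0 = q0 ^ (i - 1) * A := by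
        have hsplit : q0 ^ i * A = q0 * (q0 ^ (i - 1) * A) := by
          rw [← mul_assoc, ← pow_succ']
          congr 2
          omega
        rw [hsplit, Nat.mul_div_cancel_left _ (by omega)]
      rw [hdivq, hgcd]
      exact mul_dvd_mul (pow_dvd_pow q0 (by omega)) (Nat.gcd_dvd_left A B)
    · obtain ⟨qx, hqx, hdvdx, hgcdx⟩ := ih hgtail A B hA hB hab
      refine ⟨qx, by simp only [List.map_cons, List.mem_cons]; exact Or.inr hqx,
        dvd_mul_of_dvd_right hdvdx _, ?_⟩
      rw [Nat.mul_div_assoc _ hdvdx, hgcd]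
      exact mul_dvd_mul (pow_dvd_pow q0 (Nat.min_le_left i j)) hgcdx

-- ---------- properties of the Nat strip/reduce loops ----------
theorem pvStripZNspec (p : Int) (hp : 0 < p) (q : Nat) (hq : 2 ≤ q) :
    ∀ d : Nat, 1 ≤ d →
      pvStripZN p q d ∣ d ∧ 1 ≤ pvStripZN p q d ∧
      ¬ (q ∣ pvStripZN p q d ∧ Zb p (pvStripZN p q d / q)) ∧
      (Zb p d → Zb p (pvStripZN p q d)) ∧ (¬ Zb p d → pvStripZN p q d = d) := by
  intro d
  induction d using Nat.strong_induction_on with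
  | _ d ih =>
    intro hd
    rw [pvStripZN]
    by_cases h : 2 ≤ q ∧ 1 ≤ d ∧ d % q = 0 ∧ fib_mod_py (((d / q : Nat) : Int)) p = 0
    · rw [dif_pos h]
      have hqd : q ∣ d := Nat.dvd_of_mod_eq_zero h.2.2.1
      have hlt : d / q < d := Nat.div_lt_self (by omega) (by omega)
      have hdq1 : 1 ≤ d / q := Nat.div_pos (Nat.le_of_dvd (by omega) hqd) (by omega)
      obtain ⟨i1, i2, i3, i4, _⟩ := ih (d / q) hlt hdq1
      refine ⟨i1.trans (Nat.div_dvd_of_dvd hqd), i2, i3, fun _ => i4 h.2.2.2, fun hnz => ?_⟩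
      exact absurd (pvZup p hp (Nat.div_dvd_of_dvd hqd) h.2.2.2) hnz
    · rw [dif_neg h]
      refine ⟨dvd_rfl, hd, ?_, fun hz => hz, fun _ => rfl⟩
      rintro ⟨hqd, hz⟩
      exact h ⟨hq, hd, Nat.mod_eq_zero_of_dvd hqd, hz⟩

-- reducedness persists under further division
theorem pvReducedPersist (p : Int) (hp : 0 < p) (q d r : Nat) (hq2 : 2 ≤ q)
    (h : ¬ (q ∣ d ∧ Zb p (d / q))) (hr : r ∣ d) (hq : q ∣ r) (hz : Zb p (r / q)) : False := by
  obtain ⟨k, rfl⟩ := hr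
  have hdq : r * k / q = r / q * k := by
    conv_lhs => rw [← Nat.mul_div_cancel' hq, mul_assoc,
      Nat.mul_div_cancel_left _ (show 0 < q by omega)]
  exact h ⟨hq.trans (dvd_mul_right r k), by rw [hdq]; exact pvZup p hp (dvd_mul_right _ _) hz⟩

theorem pvStripZNmem (p : Int) (L : List (Nat × Nat)) (hg : pvGoodN L) (q : Nat)
    (hq : q ∈ L.map Prod.fst) (hq2 : 2 ≤ q) :
    ∀ d : Nat, d ∈ pvDN L → pvStripZN p q d ∈ pvDN L := by
  intro d
  induction d using Nat.strong_induction_on with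
  | _ d ih =>
    intro hd
    rw [pvStripZN]
    by_cases h : 2 ≤ q ∧ 1 ≤ d ∧ d % q = 0 ∧ fib_mod_py (((d / q : Nat) : Int)) p = 0
    · rw [dif_pos h]
      exact ih (d / q) (Nat.div_lt_self (by omega) (by omega))
        (pvDivMemDN L hg d q hd hq (Nat.dvd_of_mod_eq_zero h.2.2.1))
    · rw [dif_neg h]
      exact hd

-- the full invariant of A's reduction loop over a set of keys
theorem pvRedNinv (p : Int) (hp : 0 < p) (L : List (Nat × Nat)) (hg : pvGoodN L) :
    ∀ (ks : List Nat) (d : Nat), (∀ q ∈ ks, q ∈ L.map Prod.fst) → d ∈ pvDN L → 1 ≤ d →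
      pvRedN p ks d ∈ pvDN L ∧ pvRedN p ks d ∣ d ∧ 1 ≤ pvRedN p ks d ∧
      (Zb p d → Zb p (pvRedN p ks d)) ∧ (¬ Zb p d → pvRedN p ks d = d) ∧
      (∀ q ∈ ks, ¬ (q ∣ pvRedN p ks d ∧ Zb p (pvRedN p ks d / q))) := by
  intro ks
  induction ks with
  | nil =>
    intro d _ hd hd1
    exact ⟨hd, dvd_rfl, hd1, fun h => h, fun _ => rfl, by simp⟩
  | cons q ks ih =>
    intro d hks hd hd1
    have hqk : q ∈ L.map Prod.fst := hks q (by simp)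
    obtain ⟨qe, hqe, hqeq⟩ := List.mem_map.mp hqk
    have hq2 : 2 ≤ q := by
      have := (hg.1 qe hqe).1
      omega
    obtain ⟨s1, s2, s3, s4, s5⟩ := pvStripZNspec p hp q hq2 d hd1
    have hmem1 : pvStripZN p q d ∈ pvDN L := pvStripZNmem p L hg q hqk hq2 d hd
    obtain ⟨r1, r2, r3, r4, r5, r6⟩ :=
      ih (pvStripZN p q d) (fun x hx => hks x (by simp [hx])) hmem1 s2
    have hred : pvRedN p (q :: ks) d = pvRedN p ks (pvStripZN p q d) := rfl
    rw [hred]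
    refine ⟨r1, r2.trans s1, r3, fun hz => r4 (s4 hz), fun hnz => ?_, ?_⟩
    · have h1 := s5 hnz
      rw [h1] at r5 ⊢
      exact r5 hnz
    · intro q' hq'
      rcases List.mem_cons.mp hq' with rfl | hq'
      · rintro ⟨ha, hb⟩
        exact pvReducedPersist p hp q' (pvStripZN p q' d) (pvRedN p ks (pvStripZN p q' d))
          hq2 s3 r2 ha hb
      · exact r6 q' hq'


-- the minimality theorem: the reduction result divides every divisor in the lattice whose
-- Fibonacci index is 0 mod p
theorem pvRedNmin (p : Int) (hp : 0 < p) (L : List (Nat × Nat)) (hg : pvGoodN L)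
    (dA : Nat) (hmem : dA ∈ pvDN L) (hZ : Zb p dA)
    (hred : ∀ q ∈ L.map Prod.fst, ¬ (q ∣ dA ∧ Zb p (dA / q)))
    (d : Nat) (hd : d ∈ pvDN L) (hZd : Zb p d) : dA ∣ d := by
  by_contra hnd
  obtain ⟨q, hq, hqdA, hgcd⟩ := pvLatticeStep L hg dA d hmem hd hnd
  have hzg : Zb p (Nat.gcd dA d) := pvZgcd p hp hZ hZd
  exact hred q hq ⟨hqdA, pvZup p hp hgcd hzg⟩

-- ---------- bridges: Int ports = Nat models ----------
theorem pvStripCountBbridge (q x : Nat) :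
    ∀ e : Nat, pvStripCountB (q : Int) (x : Int) e =
      (((pvStripCN q x e).1 : Int), (pvStripCN q x e).2) := by
  induction x using Nat.strong_induction_on with
  | _ x ih =>
    intro e
    rw [pvStripCountB, pvStripCN]
    by_cases h : 2 ≤ q ∧ 1 ≤ x ∧ x % q = 0
    · have hint : 2 ≤ (q : Int) ∧ 1 ≤ (x : Int) ∧ PySem.Int.mod (x : Int) (q : Int) = 0 := by
        refine ⟨by exact_mod_cast h.1, by exact_mod_cast h.2.1, ?_⟩
        rw [PySem.Int.mod_natCast]
        exact_mod_cast h.2.2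
      rw [dif_pos hint, dif_pos h, PySem.Int.floordiv_natCast]
      exact ih (x / q) (Nat.div_lt_self (by omega) (by omega)) (e + 1)
    · have hint : ¬ (2 ≤ (q : Int) ∧ 1 ≤ (x : Int) ∧ PySem.Int.mod (x : Int) (q : Int) = 0) := by
        intro hc
        refine h ⟨by exact_mod_cast hc.1, by exact_mod_cast hc.2.1, ?_⟩
        have hm := hc.2.2
        rw [PySem.Int.mod_natCast] at hm
        exact_mod_cast hm
      rw [dif_neg hint, dif_neg h]

theorem pvStripAbridge (q : Nat) :
    ∀ (x e : Nat), pvStripA (q : Int) (x : Int) = (((pvStripCN q x e).1 : Int)) := by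
  intro x
  induction x using Nat.strong_induction_on with
  | _ x ih =>
    intro e
    rw [pvStripA, pvStripCN]
    by_cases h : 2 ≤ q ∧ 1 ≤ x ∧ x % q = 0
    · have hint : 2 ≤ (q : Int) ∧ 1 ≤ (x : Int) ∧ PySem.Int.mod (x : Int) (q : Int) = 0 := by
        refine ⟨by exact_mod_cast h.1, by exact_mod_cast h.2.1, ?_⟩
        rw [PySem.Int.mod_natCast]
        exact_mod_cast h.2.2
      rw [dif_pos hint, dif_pos h, PySem.Int.floordiv_natCast]
      exact ih (x / q) (Nat.div_lt_self (by omega) (by omega)) (e + 1)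
    · have hint : ¬ (2 ≤ (q : Int) ∧ 1 ≤ (x : Int) ∧ PySem.Int.mod (x : Int) (q : Int) = 0) := by
        intro hc
        refine h ⟨by exact_mod_cast hc.1, by exact_mod_cast hc.2.1, ?_⟩
        have hm := hc.2.2
        rw [PySem.Int.mod_natCast] at hm
        exact_mod_cast hm
      rw [dif_neg hint, dif_neg h]

theorem pvStripDAbridge (p : Int) (q : Nat) :
    ∀ d : Nat, pvStripDA p (q : Int) (d : Int) = ((pvStripZN p q d : Nat) : Int) := by
  intro d
  induction d using Nat.strong_induction_on with
  | _ d ih =>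
    rw [pvStripDA, pvStripZN]
    by_cases h : 2 ≤ q ∧ 1 ≤ d ∧ d % q = 0 ∧ fib_mod_py (((d / q : Nat) : Int)) p = 0
    · have hint : 2 ≤ (q : Int) ∧ 1 ≤ (d : Int) ∧ PySem.Int.mod (d : Int) (q : Int) = 0 ∧
          fib_mod_py (PySem.Int.floordiv (d : Int) (q : Int)) p = 0 := by
        refine ⟨by exact_mod_cast h.1, by exact_mod_cast h.2.1, ?_, ?_⟩
        · rw [PySem.Int.mod_natCast]
          exact_mod_cast h.2.2.1
        · rw [PySem.Int.floordiv_natCast]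
          exact h.2.2.2
      rw [dif_pos hint, dif_pos h, PySem.Int.floordiv_natCast]
      exact ih (d / q) (Nat.div_lt_self (by omega) (by omega))
    · have hint : ¬ (2 ≤ (q : Int) ∧ 1 ≤ (d : Int) ∧ PySem.Int.mod (d : Int) (q : Int) = 0 ∧
          fib_mod_py (PySem.Int.floordiv (d : Int) (q : Int)) p = 0) := by
        intro hc
        refine h ⟨by exact_mod_cast hc.1, by exact_mod_cast hc.2.1, ?_, ?_⟩
        · have hm := hc.2.2.1
          rw [PySem.Int.mod_natCast] at hm
          exact_mod_cast hm
        · have hf := hc.2.2.2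
          rw [PySem.Int.floordiv_natCast] at hf
          exact hf
      rw [dif_neg hint, dif_neg h]

theorem pvReduceAbridge (p : Int) (ks : List Nat) :
    ∀ d : Nat, pvReduceA p (ks.map (fun q : Nat => (q : Int))) (d : Int) =
      ((pvRedN p ks d : Nat) : Int) := by
  induction ks with
  | nil => intro d; rfl
  | cons q ks ih =>
    intro d
    have h1 : pvReduceA p ((q :: ks).map (fun q : Nat => (q : Int))) (d : Int) =
        pvReduceA p (ks.map (fun q : Nat => (q : Int))) (pvStripDA p (q : Int) (d : Int)) := rfl
    rw [h1, pvStripDAbridge p q d, ih]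
    rfl

theorem pvStripCNshift (q : Nat) :
    ∀ (x e : Nat), pvStripCN q x e = ((pvStripCN q x 0).1, e + (pvStripCN q x 0).2) := by
  intro x
  induction x using Nat.strong_induction_on with
  | _ x ih =>
    intro e
    by_cases h : 2 ≤ q ∧ 1 ≤ x ∧ x % q = 0
    · rw [pvStripCN, dif_pos h, ih (x / q) (Nat.div_lt_self (by omega) (by omega)) (e + 1)]
      conv_rhs => rw [pvStripCN, dif_pos h, ih (x / q) (Nat.div_lt_self (by omega) (by omega)) 1]
      simp only [Prod.mk.injEq, true_and]
      omega
    · rw [pvStripCN, dif_neg h]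
      conv_rhs => rw [pvStripCN, dif_neg h]
      simp

-- pvStripCN: full specification of trial division by q
theorem pvStripCNspec (q : Nat) (hq : 2 ≤ q) :
    ∀ x : Nat, 1 ≤ x →
      x = q ^ (pvStripCN q x 0).2 * (pvStripCN q x 0).1 ∧
      1 ≤ (pvStripCN q x 0).1 ∧ ¬ q ∣ (pvStripCN q x 0).1 ∧
      ((pvStripCN q x 0).2 ≠ 0 ↔ x % q = 0) := by
  intro x
  induction x using Nat.strong_induction_on with
  | _ x ih =>
    intro hx
    by_cases h : 2 ≤ q ∧ 1 ≤ x ∧ x % q = 0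
    · have hfire : pvStripCN q x 0 = ((pvStripCN q (x / q) 0).1, 1 + (pvStripCN q (x / q) 0).2) := by
        rw [pvStripCN, dif_pos h, pvStripCNshift q (x / q) 1]
      have hqd : q ∣ x := Nat.dvd_of_mod_eq_zero h.2.2
      have hdq1 : 1 ≤ x / q := Nat.div_pos (Nat.le_of_dvd (by omega) hqd) (by omega)
      obtain ⟨i1, i2, i3, i4⟩ := ih (x / q) (Nat.div_lt_self (by omega) (by omega)) hdq1
      rw [hfire]
      refine ⟨?_, i2, i3, by simp [h.2.2]⟩
      show x = q ^ (1 + (pvStripCN q (x / q) 0).2) * (pvStripCN q (x / q) 0).1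
      rw [pow_add, pow_one, mul_assoc, ← i1]
      exact (Nat.mul_div_cancel' hqd).symm
    · have hstop : pvStripCN q x 0 = (x, 0) := by
        rw [pvStripCN, dif_neg h]
      have hmod : ¬ x % q = 0 := fun hc => h ⟨hq, hx, hc⟩
      rw [hstop]
      exact ⟨by simp, hx, fun hc => hmod (Nat.mod_eq_zero_of_dvd hc), by simp [hmod]⟩

-- the combined factor-loop lemma: both ports' loops compute casts of one Nat factorisation,
-- which is sound (product, coprimality, primality of the small factors)
theorem pvFacBridge (p : Int) (sp : List Int) :
    ∀ (x : Nat), 1 ≤ x → (x : Int) ≤ p + 1 → pvEntriesOk p sp = true →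
    (∀ accB, pvFacLoopB sp (x : Int) accB =
        (accB ++ (pvFacN sp x).1.map (fun qe => ((qe.1 : Int), qe.2)),
          (((pvFacN sp x).2 : Nat) : Int))) ∧
    (∀ accA, pvFacLoopA sp (x : Int) accA =
        (accA ++ (pvFacN sp x).1.map (fun qe => ((qe.1 : Int))),
          (((pvFacN sp x).2 : Nat) : Int))) ∧
    x = pvProdN (pvFacN sp x).1 * (pvFacN sp x).2 ∧
    1 ≤ (pvFacN sp x).2 ∧
    (∀ qe ∈ (pvFacN sp x).1, Nat.Prime qe.1 ∧ 1 ≤ qe.2) ∧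
    (∀ qe ∈ (pvFacN sp x).1, ¬ qe.1 ∣ (pvFacN sp x).2) ∧
    (pvFacN sp x).1.Pairwise (fun a b => Nat.Coprime a.1 b.1) := by
  induction sp with
  | nil =>
    intro x hx _ _
    refine ⟨fun accB => ?_, fun accA => ?_, by simp [pvFacN, pvProdN], by simp [pvFacN, hx],
      by simp [pvFacN], by simp [pvFacN], by simp [pvFacN]⟩
    · simp [pvFacLoopB, pvFacN]
    · simp [pvFacLoopA, pvFacN]
  | cons q rest ih =>
    intro x hx hbound hok
    by_cases hbr : q * q > (x : Int)
    · have hmodel : pvFacN (q :: rest) x = ([], x) := by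
        rw [pvFacN, if_pos hbr]
      rw [hmodel]
      refine ⟨fun accB => ?_, fun accA => ?_, by simp [pvProdN], hx, by simp, by simp, by simp⟩
      · simp [pvFacLoopB, if_pos hbr]
      · simp [pvFacLoopA, if_pos hbr]
    · -- the entry is scanned: Pre_ makes it a genuine prime
      have hnb : ¬ (p + 1 < q * q) := by omega
      have hok2 : 2 ≤ q ∧ Nat.Prime q.toNat ∧ pvEntriesOk p rest = true := by
        rw [pvEntriesOk] at hok
        simp only [Bool.or_eq_true, Bool.and_eq_true, decide_eq_true_eq] at hok
        rcases hok with h | h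
        · exact absurd h hnb
        · exact ⟨h.1.1, h.1.2, h.2⟩
      obtain ⟨hq2, hqp, hokr⟩ := hok2
      have hqcast : ((q.toNat : Nat) : Int) = q := Int.toNat_of_nonneg (by omega)
      have hq2' : 2 ≤ q.toNat := by omega
      obtain ⟨s1, s2, s3, s4⟩ := pvStripCNspec q.toNat hq2' x hx
      set c1 := (pvStripCN q.toNat x 0).1 with hc1
      set c2 := (pvStripCN q.toNat x 0).2 with hc2
      have hc1x : c1 ∣ x := Dvd.intro_left _ s1.symm
      have hc1b : (c1 : Int) ≤ p + 1 := by
        have hle := Nat.le_of_dvd (by omega) hc1x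
        have hcast : (c1 : Int) ≤ (x : Int) := by exact_mod_cast hle
        omega
      obtain ⟨ihB, ihA, ihP, ihX, ihPr, ihD, ihPw⟩ := ih c1 s2 hc1b hokr
      set Lr := (pvFacN rest c1).1 with hLr
      set x2 := (pvFacN rest c1).2 with hx2
      have hbridge : pvStripCountB q (x : Int) 0 = ((c1 : Int), c2) := by
        rw [← hqcast]
        exact pvStripCountBbridge q.toNat x 0
      have hstripA : pvStripA q (x : Int) = (c1 : Int) := by
        rw [← hqcast]
        exact pvStripAbridge q.toNat x 0
      have hqe1 : ∀ qe ∈ Lr, qe.1 ∣ c1 := by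
        intro qe hqe
        calc qe.1 ∣ qe.1 ^ qe.2 := dvd_pow_self _ (by have := (ihPr qe hqe).2; omega)
          _ ∣ pvProdN Lr := List.dvd_prod (List.mem_map.mpr ⟨qe, hqe, rfl⟩)
          _ ∣ c1 := Dvd.intro _ ihP.symm
      have hx2c1 : x2 ∣ c1 := Dvd.intro_left _ ihP.symm
      by_cases he : c2 ≠ 0
      · have hmodel : pvFacN (q :: rest) x = ((q.toNat, c2) :: Lr, x2) := by
          rw [pvFacN, if_neg hbr]
          simp only [← hc1, ← hc2, ← hLr, ← hx2, if_pos he]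
        have hcop : Nat.Coprime q.toNat c1 := (Nat.Prime.coprime_iff_not_dvd hqp).mpr s3
        rw [hmodel]
        refine ⟨fun accB => ?_, fun accA => ?_, ?_, ihX, ?_, ?_, ?_⟩
        · rw [pvFacLoopB, if_neg hbr]
          simp only [hbridge, he, ne_eq, not_false_iff, if_true]
          rw [ihB (accB ++ [(q, c2)])]
          simp [hqcast]
        · rw [pvFacLoopA, if_neg hbr]
          have hmodA : PySem.Int.mod (x : Int) q = 0 := by
            rw [← hqcast, PySem.Int.mod_natCast]
            exact_mod_cast s4.mp he
          rw [if_pos hmodA, hstripA, ihA (accA ++ [q])]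
          simp [hqcast]
        · have : pvProdN ((q.toNat, c2) :: Lr) = q.toNat ^ c2 * pvProdN Lr := by
            simp [pvProdN]
          rw [this, mul_assoc, ← ihP]
          exact s1
        · intro qe hqe
          rcases List.mem_cons.mp hqe with rfl | hqe
          · exact ⟨hqp, by omega⟩
          · exact ihPr qe hqe
        · intro qe hqe
          rcases List.mem_cons.mp hqe with rfl | hqe
          · intro hdvd
            exact s3 (hdvd.trans hx2c1)
          · exact ihD qe hqe
        · rw [List.pairwise_cons]
          refine ⟨fun qe hqe => Nat.Coprime.coprime_dvd_right (hqe1 qe hqe) hcop, ihPw⟩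
      · -- the entry does not divide x: nothing stripped, nothing appended
        have hc2z : c2 = 0 := by omega
        have hc1eq : c1 = x := by
          rw [s1, hc2z]
          simp
        have hmodel : pvFacN (q :: rest) x = (Lr, x2) := by
          rw [pvFacN, if_neg hbr]
          simp only [← hc1, ← hc2, ← hLr, ← hx2, if_neg he]
        rw [hmodel]
        refine ⟨fun accB => ?_, fun accA => ?_, by rw [← hc1eq]; exact ihP, ihX, ihPr, ihD, ihPw⟩
        · rw [pvFacLoopB, if_neg hbr]
          simp only [hbridge]
          rw [if_neg (by simpa using he), ihB accB]
        · rw [pvFacLoopA, if_neg hbr]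
          have hmodA : ¬ PySem.Int.mod (x : Int) q = 0 := by
            rw [← hqcast, PySem.Int.mod_natCast]
            intro hc
            exact he (s4.mpr (by exact_mod_cast hc))
          rw [if_neg hmodA, ← hc1eq, ihA accA]

-- ---------- B-side: divisors fold and find-first ----------
theorem pvDivFoldBridge (L : List (Nat × Nat)) :
    ∀ (divs : List Nat),
      List.foldl pvDivStepB (divs.map (fun d : Nat => (d : Int))) (L.map (fun qe => ((qe.1 : Int), qe.2))) =
        (List.foldl pvStepN divs L).map (fun d : Nat => (d : Int)) := by
  induction L with
  | nil => intro divs; rfl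
  | cons qe L ih =>
    intro divs
    have hinner : ∀ d : Nat, (List.range (qe.2 + 1)).map (fun i => (d : Int) * (qe.1 : Int) ^ i) =
        ((List.range (qe.2 + 1)).map (fun i => d * qe.1 ^ i)).map (fun n : Nat => (n : Int)) := by
      intro d
      rw [List.map_map]
      simp [Function.comp, Nat.cast_mul, Nat.cast_pow]
    have hstep : ∀ ds : List Nat, pvDivStepB (ds.map (fun d : Nat => (d : Int))) ((qe.1 : Int), qe.2) =
        (pvStepN ds qe).map (fun d : Nat => (d : Int)) := by
      intro ds
      induction ds with
      | nil => rfl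
      | cons d ds ihd =>
        simp only [pvDivStepB, pvStepN, List.map_cons, List.flatMap_cons] at ihd ⊢
        rw [ihd, List.map_append, hinner d]
    simp only [List.map_cons, List.foldl_cons, hstep, ih]

theorem pvFindBspec (p : Int) :
    ∀ l : List Int, l.Pairwise (· ≤ ·) →
      (∀ z, pvFindB p l = some z →
        z ∈ l ∧ fib_mod_py z p = 0 ∧ ∀ y ∈ l, fib_mod_py y p = 0 → z ≤ y) ∧
      (pvFindB p l = none → ∀ y ∈ l, ¬ fib_mod_py y p = 0) := by
  intro l
  induction l with
  | nil =>
    intro _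
    exact ⟨fun z hz => by simp [pvFindB] at hz, fun _ y hy => by simp at hy⟩
  | cons d rest ih =>
    intro hpw
    have hpc := List.pairwise_cons.mp hpw
    obtain ⟨ih1, ih2⟩ := ih hpc.2
    constructor
    · intro z hz
      rw [pvFindB] at hz
      by_cases hc : fib_mod_py d p = 0
      · rw [if_pos hc] at hz
        obtain rfl : d = z := by injection hz
        refine ⟨by simp, hc, fun y hy _ => ?_⟩
        rcases List.mem_cons.mp hy with rfl | hy
        · exact le_refl _
        · exact hpc.1 y hy
      · rw [if_neg hc] at hz
        obtain ⟨m1, m2, m3⟩ := ih1 z hz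
        refine ⟨by simp [m1], m2, fun y hy hyz => ?_⟩
        rcases List.mem_cons.mp hy with rfl | hy
        · exact absurd hyz hc
        · exact m3 y hy hyz
    · intro hn y hy hz
      rw [pvFindB] at hn
      by_cases hc : fib_mod_py d p = 0
      · rw [if_pos hc] at hn
        cases hn
      · rw [if_neg hc] at hn
        rcases List.mem_cons.mp hy with rfl | hy
        · exact hc hz
        · exact ih2 hn y hy hz

-- ---------- assembly ----------
theorem pvCandPos (p : Int) (hp : 1 ≤ p) (h2 : p ≠ 2) (h5 : p ≠ 5) :
    1 ≤ (if PySem.Int.powMod 5 (PySem.Int.floordiv (p - 1) 2).toNat p = 1 then p - 1 else p + 1) := by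
  by_cases h1 : p = 1
  · subst h1
    have hpm : PySem.Int.powMod 5 (PySem.Int.floordiv (1 - 1) 2).toNat 1 ≠ 1 := by decide
    rw [if_neg hpm]
    omega
  · split_ifs <;> omega

theorem pvMain (p : Int) (sp : List Int) (hp : 1 ≤ p) (h2 : p ≠ 2) (h5 : p ≠ 5)
    (hok : pvEntriesOk p sp = true) :
    rank_of_apparition_prime p sp = rank_of_apparition_prime_alt p sp := by
  have hp0 : 0 < p := by omega
  have hcand0 := pvCandPos p hp h2 h5
  set cand : Int :=
    if PySem.Int.powMod 5 (PySem.Int.floordiv (p - 1) 2).toNat p = 1 then p - 1 else p + 1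
    with hcdef
  have hcb : cand ≤ p + 1 := by rw [hcdef]; split_ifs <;> omega
  set C : Nat := cand.toNat with hC
  have hCcast : (C : Int) = cand := Int.toNat_of_nonneg (by omega)
  have hC1 : 1 ≤ C := by omega
  obtain ⟨fB, fA, fP, fX, fPr, fD, fPw⟩ := pvFacBridge p sp C hC1 (by rw [hCcast]; exact hcb) hok
  set L0 := (pvFacN sp C).1 with hL0
  set x2 := (pvFacN sp C).2 with hx2
  set Lf : List (Nat × Nat) := if 1 < x2 then L0 ++ [(x2, 1)] else L0 with hLf
  have hGood : pvGoodN Lf := by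
    constructor
    · intro qe hqe
      rw [hLf] at hqe
      split_ifs at hqe with hx21
      · rcases List.mem_append.mp hqe with h | h
        · exact ⟨(fPr qe h).1.two_le, (fPr qe h).2⟩
        · simp only [List.mem_singleton] at h
          subst h
          exact ⟨by omega, le_rfl⟩
      · exact ⟨(fPr qe hqe).1.two_le, (fPr qe hqe).2⟩
    · rw [hLf]
      split_ifs with hx21
      · rw [List.pairwise_append]
        refine ⟨fPw, List.pairwise_singleton _ _, ?_⟩
        intro a ha b hb
        simp only [List.mem_singleton] at hb
        subst hb
        exact ((fPr a ha).1.coprime_iff_not_dvd).mpr (fD a ha)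
      · exact fPw
  have hprod : pvProdN Lf = C := by
    rw [hLf]
    split_ifs with hx21
    · have happ : pvProdN (L0 ++ [(x2, 1)]) = pvProdN L0 * x2 ^ 1 := by
        simp [pvProdN]
      rw [happ, pow_one, ← fP]
    · have hx21' : x2 = 1 := by omega
      rw [hx21', mul_one] at fP
      exact fP.symm
  set ks := Lf.map Prod.fst with hks
  set dA := pvRedN p ks C with hdA
  have hCin : C ∈ pvDN Lf := hprod ▸ pvProdMemDN Lf
  obtain ⟨R1, R2, R3, R4, R5, R6⟩ :=
    pvRedNinv p hp0 Lf hGood ks C (fun q hq => hq) hCin hC1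
  -- A-side value
  have hcandA : (if pvLegendreA p = 1 then p - 1 else p + 1) = cand := by
    rw [hcdef]
    simp only [pvLegendreA]
    by_cases hr : PySem.Int.powMod 5 (PySem.Int.floordiv (p - 1) 2).toNat p = 1
    · simp only [if_pos hr]
      norm_num
    · simp only [if_neg hr]
      norm_num
  have hufps : pvUniquePrimeFactorsSmall cand sp = ks.map (fun q : Nat => (q : Int)) := by
    rw [pvUniquePrimeFactorsSmall, ← hCcast, fA []]
    simp only [List.nil_append]
    rw [hks, hLf]
    by_cases hx21 : 1 < x2
    · rw [if_pos (show ((x2 : Nat) : Int) > 1 by exact_mod_cast hx21), if_pos hx21]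
      simp [List.map_append, List.map_map, Function.comp]
    · rw [if_neg (show ¬ ((x2 : Nat) : Int) > 1 by exact_mod_cast hx21), if_neg hx21]
      simp [List.map_map, Function.comp]
  have hA : rank_of_apparition_prime p sp = ((dA : Nat) : Int) := by
    rw [rank_of_apparition_prime, if_neg h2, if_neg h5]
    simp only [hcandA]
    rw [hufps, ← hCcast, pvReduceAbridge p ks C, hdA]
  -- B-side value
  have hone : ([(1 : Int)] : List Int) = ([1] : List Nat).map (fun d : Nat => (d : Int)) := by
    simp
  have hfacB : (pvFacLoopB sp cand []) =
      (L0.map (fun qe => ((qe.1 : Int), qe.2)), ((x2 : Nat) : Int)) := by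
    rw [← hCcast, fB []]
    simp
  set sl := PySem.List.sorted ((pvDN Lf).map (fun d : Nat => (d : Int))) id false with hsl
  have hB : rank_of_apparition_prime_alt p sp =
      (match pvFindB p sl with | some d => d | none => cand) := by
    rw [rank_of_apparition_prime_alt, if_neg h2, if_neg h5]
    simp only [← hcdef, hfacB]
    have hfac : (if ((x2 : Nat) : Int) > 1
          then L0.map (fun qe => ((qe.1 : Int), qe.2)) ++ [(((x2 : Nat) : Int), 1)]
          else L0.map (fun qe => ((qe.1 : Int), qe.2))) =
        Lf.map (fun qe => ((qe.1 : Int), qe.2)) := by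
      rw [hLf]
      by_cases hx21 : 1 < x2
      · rw [if_pos (show ((x2 : Nat) : Int) > 1 by exact_mod_cast hx21), if_pos hx21]
        simp
      · rw [if_neg (show ¬ ((x2 : Nat) : Int) > 1 by exact_mod_cast hx21), if_neg hx21]
    rw [hfac, hone, pvDivFoldBridge Lf [1]]
    rfl
  have hpw : sl.Pairwise (· ≤ ·) := by
    have h := PySem.List.sorted_pairwise ((pvDN Lf).map (fun d : Nat => (d : Int))) id
    exact h.imp (fun hab => hab)
  have hmem : ∀ y, y ∈ sl ↔ y ∈ (pvDN Lf).map (fun d : Nat => (d : Int)) := by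
    intro y
    exact (PySem.List.sorted_perm _ _ _).mem_iff
  obtain ⟨spec1, spec2⟩ := pvFindBspec p sl hpw
  rw [hA, hB]
  cases hfind : pvFindB p sl with
  | none =>
    have hnC : ¬ Zb p C := by
      have hCsl : ((C : Nat) : Int) ∈ sl :=
        (hmem _).mpr (List.mem_map.mpr ⟨C, hCin, rfl⟩)
      exact spec2 hfind _ hCsl
    rw [hdA, R5 hnC]
    simp [hCcast]
  | some z =>
    obtain ⟨hz1, hz2, hz3⟩ := spec1 z hfind
    obtain ⟨zn, hzn, rfl⟩ := List.mem_map.mp ((hmem z).mp hz1)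
    have hzZ : Zb p zn := hz2
    have hZC : Zb p C := pvZup p hp0 (hprod ▸ pvDvdProdN Lf zn hzn) hzZ
    have hZdA : Zb p dA := R4 hZC
    have hdvd : dA ∣ zn :=
      pvRedNmin p hp0 Lf hGood dA R1 hZdA R6 zn hzn hzZ
    have hle1 : dA ≤ zn :=
      Nat.le_of_dvd (pvMemDNpos Lf hGood.1 zn hzn) hdvd
    have hle2 : ((zn : Nat) : Int) ≤ ((dA : Nat) : Int) := by
      refine hz3 _ ((hmem _).mpr (List.mem_map.mpr ⟨dA, R1, rfl⟩)) ?_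
      exact hZdA
    have : zn = dA := by omega
    simp [this]

-- ===== VERDICT (by name: the statement is the Claim_ definition above) =====
theorem rank_of_apparition_prime_spec : Claim_equal_rank_of_apparition_prime := by
  intro p sp _hd hpre
  unfold Spec_rank_of_apparition_prime
  obtain ⟨hp1, hrest⟩ := hpre
  by_cases h2 : p = 2
  · simp [rank_of_apparition_prime, rank_of_apparition_prime_alt, h2]
  by_cases h5 : p = 5
  · simp [rank_of_apparition_prime, rank_of_apparition_prime_alt, h5]
  have hok : pvEntriesOk p sp = true := by
    rcases hrest with h | h | h
    · exact absurd h h2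
    · exact absurd h h5
    · exact h
  exact pvMain p sp hp1 h2 h5 hok
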